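-- pv_equiv track=rewrite | github.com/jbsmith22/songbook-splitter | flatten_s3_no_songs_folder.py | determine_target_book
-- ===== SOURCE A (Python) =====
-- def parse_incorrect_path(key):
--     """Parse an incorrect path to extract artist, book, and filename."""
--     parts = key.split('/')
--
--     if len(parts) < 3:
--         return None
--
--     artist = parts[0]
--     filename = parts[-1]  # Last part is always the filename
--
--     # Middle parts are the book folder(s) - may be nested
--     middle_parts = parts[1:-1]
--
--     return {
--         'artist': artist,
--         'middle_parts': middle_parts,
--         'filename': filename,
--         'full_path': key,
--         'depth': len(parts)
--     }
--
-- def determine_target_book(artist, all_incorrect_keys):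
--     """
--     Determine the correct book folder name for an artist.
--     Prefer: <Artist> - <Book> format
--     """
--     book_candidates = set()
--
--     for key in all_incorrect_keys:
--         parsed = parse_incorrect_path(key)
--         if parsed:
--             # Look at the first folder after artist (the book folder)
--             if parsed['middle_parts']:
--                 book_candidates.add(parsed['middle_parts'][0])
--
--     # Prefer folders with " - " that start with artist name
--     preferred = [b for b in book_candidates if ' - ' in b and b.lower().startswith(artist.lower())]
--     if preferred:
--         return sorted(preferred, key=len)[0]
--
--     # Otherwise, prefer any folder with " - "
--     with_dash = [b for b in book_candidates if ' - ' in b]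
--     if with_dash:
--         return sorted(with_dash, key=len)[0]
--
--     # Fallback to most common
--     if book_candidates:
--         return sorted(book_candidates)[0]
--
--     return None
-- ===== SOURCE B (Python) =====
-- def determine_target_book(artist, all_incorrect_keys):
--     """Single keyed min-selection instead of three filter+sort passes."""
--     candidates = set()
--     for key in all_incorrect_keys:
--         parts = key.split('/')
--         if len(parts) >= 3:
--             candidates.add(parts[1])
--     if not candidates:
--         return None
--     al = artist.lower()
--     def sel_key(b):
--         if ' - ' in b:
--             return (0 if b.lower().startswith(al) else 1, len(b), '')
--         return (2, 0, b)
--     return min(candidates, key=sel_key)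
-- ===== Notes on version B (the rewrite author's own statement) =====
-- stated objective: simpler
-- what changed: B replaces A's three filter+sort passes (preferred, with-dash, fallback) by a single min over the candidate set under one priority key (rank, length, name); candidates are read directly as parts[1] of each key instead of going through the parse dict.
-- outside the precondition, e.g. on determine_target_book('a', ['a/a - x/f', 'a/b - 1/f', 'a/b - 2/f']): A returns 'a - x', B returns 'a - x'
import Mathlib
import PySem

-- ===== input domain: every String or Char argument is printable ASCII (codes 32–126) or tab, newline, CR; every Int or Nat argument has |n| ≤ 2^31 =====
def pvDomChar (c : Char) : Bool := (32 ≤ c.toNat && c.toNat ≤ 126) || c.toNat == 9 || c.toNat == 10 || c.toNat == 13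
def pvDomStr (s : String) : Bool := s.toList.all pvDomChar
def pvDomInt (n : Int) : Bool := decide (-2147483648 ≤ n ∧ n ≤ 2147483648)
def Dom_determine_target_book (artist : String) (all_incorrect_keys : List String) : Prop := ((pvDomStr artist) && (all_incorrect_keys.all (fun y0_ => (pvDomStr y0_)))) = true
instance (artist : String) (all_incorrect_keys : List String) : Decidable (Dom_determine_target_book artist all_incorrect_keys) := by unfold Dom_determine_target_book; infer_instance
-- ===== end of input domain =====

-- key.split('/') with the nonempty separator "/": Str.split? is none only for sep = "", so getD [] is exact here.
def pvSplitSlash (key : String) : List String := (PySem.Str.split? key "/").getD []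

-- B replaces A's three filter+sort passes by one keyed min-selection over the candidate set; objective: simpler.

-- ===== PORT A =====
-- Python's heterogeneous dict {'artist': …, 'middle_parts': …, …} is ported as a structure with the same fields.
structure PvParsed where
  artist : String
  middle_parts : List String
  filename : String
  full_path : String
  depth : Int
deriving DecidableEq, Repr

def parse_incorrect_path (key : String) : Option PvParsed :=
  let parts := pvSplitSlash key
  if parts.length < 3 then none
  else some { artist := PySem.List.pyGetD parts 0 ""
            , middle_parts := PySem.List.slice parts (some 1) (some (-1))
            , filename := PySem.List.pyGetD parts (-1) ""
            , full_path := key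
            , depth := (parts.length : Int) }

def determine_target_book (artist : String) (all_incorrect_keys : List String) : Option String :=
  let book_candidates : PySem.Set String := all_incorrect_keys.foldl (fun s key =>
    match parse_incorrect_path key with
    | none => s
    | some parsed =>
        if parsed.middle_parts ≠ [] then PySem.Set.add s (PySem.List.pyGetD parsed.middle_parts 0 "") else s)
    PySem.Set.empty
  let preferred := book_candidates.filter (fun b => PySem.Str.isIn " - " b && PySem.Str.startswith (PySem.Str.lower b) (PySem.Str.lower artist))
  if preferred ≠ [] then
    some (PySem.List.pyGetD (PySem.List.sorted preferred (fun b => PySem.Str.len b) false) 0 "")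
  else
    let with_dash := book_candidates.filter (fun b => PySem.Str.isIn " - " b)
    if with_dash ≠ [] then
      some (PySem.List.pyGetD (PySem.List.sorted with_dash (fun b => PySem.Str.len b) false) 0 "")
    else if book_candidates ≠ [] then
      some (PySem.List.pyGetD (PySem.List.sorted book_candidates (fun b => b) false) 0 "")
    else none

-- ===== PORT B =====
def pvSelKey (al : String) (b : String) : Int × Int × String :=
  if PySem.Str.isIn " - " b then
    ((if PySem.Str.startswith (PySem.Str.lower b) al then 0 else 1), PySem.Str.len b, "")
  else (2, 0, b)

-- Python's lexicographic comparison of the (Int, Int, String) key tuples.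
def pvKeyLt (x y : Int × Int × String) : Bool :=
  x.1 < y.1 || (x.1 == y.1 && (x.2.1 < y.2.1 || (x.2.1 == y.2.1 && x.2.2 < y.2.2)))

def determine_target_book_alt (artist : String) (all_incorrect_keys : List String) : Option String :=
  let candidates : PySem.Set String := all_incorrect_keys.foldl (fun s key =>
    let parts := pvSplitSlash key
    if 3 ≤ parts.length then PySem.Set.add s (PySem.List.pyGetD parts 1 "") else s)
    PySem.Set.empty
  match candidates with
  | [] => none
  | c :: t =>
    let al := PySem.Str.lower artist
    some (t.foldl (fun m x => if pvKeyLt (pvSelKey al x) (pvSelKey al m) then x else m) c)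

-- ===== PRECONDITION & SPEC =====
def pvRank (artist b : String) : Int :=
  if PySem.Str.isIn " - " b then
    (if PySem.Str.startswith (PySem.Str.lower b) (PySem.Str.lower artist) then 0 else 1)
  else 2

def pvCands (keys : List String) : List String :=
  PySem.List.dedup ((keys.filter (fun k => 3 ≤ (pvSplitSlash k).length)).map
    (fun k => PySem.List.pyGetD (pvSplitSlash k) 1 ""))

-- Pre_ excludes inputs where two DISTINCT candidate book names containing " - " fall in the same
-- preference class and have equal length: there A's winner is an accident of Python's set iteration
-- order (sorted(..., key=len) tie), which no port can reproduce.
def Pre_determine_target_book (artist : String) (all_incorrect_keys : List String) : Prop :=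
  ∀ b ∈ pvCands all_incorrect_keys, ∀ c ∈ pvCands all_incorrect_keys,
    pvRank artist b = pvRank artist c → pvRank artist b ≠ 2 →
    PySem.Str.len b = PySem.Str.len c → b = c

instance (artist : String) (all_incorrect_keys : List String) : Decidable (Pre_determine_target_book artist all_incorrect_keys) := by
  unfold Pre_determine_target_book; infer_instance

def pvWitness_determine_target_book : String × List String :=
  ("abba", ["abba/Abba - Gold/x.pdf", "abba/Misc/y.pdf", "bad"])

def Spec_determine_target_book (artist : String) (all_incorrect_keys : List String) (out : Option String) : Prop := out = determine_target_book_alt artist all_incorrect_keys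
instance (artist : String) (all_incorrect_keys : List String) (out : Option String) : Decidable (Spec_determine_target_book artist all_incorrect_keys out) := by unfold Spec_determine_target_book; infer_instance

-- ===== CLAIM (what is proved, stated in full; the proofs are below) =====
def Claim_equal_determine_target_book : Prop := ∀ (artist : String) (all_incorrect_keys : List String), Dom_determine_target_book artist all_incorrect_keys → Pre_determine_target_book artist all_incorrect_keys → Spec_determine_target_book artist all_incorrect_keys (determine_target_book artist all_incorrect_keys)

-- ===== LEMMAS AND PROOFS =====

-- the key tuples, viewed in the lexicographic order Python uses to compare them
def pvK (x : Int × Int × String) : Lex (Int × Lex (Int × String)) := toLex (x.1, toLex (x.2.1, x.2.2))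

theorem pvKeyLt_iff (x y : Int × Int × String) : pvKeyLt x y = true ↔ pvK x < pvK y := by
  simp [pvKeyLt, pvK, Prod.Lex.lt_iff]

theorem pvKeyLt_false_iff (x y : Int × Int × String) : pvKeyLt x y = false ↔ pvK y ≤ pvK x := by
  rw [← Bool.not_eq_true, not_iff_comm, pvKeyLt_iff, not_le]

theorem pvK_lt_iff (x y : Int × Int × String) :
    pvK x < pvK y ↔ (x.1 < y.1 ∨ (x.1 = y.1 ∧ (x.2.1 < y.2.1 ∨ (x.2.1 = y.2.1 ∧ x.2.2 < y.2.2)))) := by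
  simp [pvK, Prod.Lex.lt_iff]

theorem pvK_le_fst (x y : Int × Int × String) (h : pvK x ≤ pvK y) : x.1 ≤ y.1 := by
  by_contra h'
  push Not at h'
  exact absurd ((pvK_lt_iff y x).mpr (Or.inl h')) (not_lt.mpr h)

theorem pvK_le_snd (x y : Int × Int × String) (h1 : x.1 = y.1) (h : pvK x ≤ pvK y) : x.2.1 ≤ y.2.1 := by
  by_contra h'
  push Not at h'
  exact absurd ((pvK_lt_iff y x).mpr (Or.inr ⟨h1.symm, Or.inl h'⟩)) (not_lt.mpr h)

theorem pvK_le_trd (x y : Int × Int × String) (h1 : x.1 = y.1) (h2 : x.2.1 = y.2.1)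
    (h : pvK x ≤ pvK y) : x.2.2 ≤ y.2.2 := by
  by_contra h'
  push Not at h'
  exact absurd ((pvK_lt_iff y x).mpr (Or.inr ⟨h1.symm, Or.inr ⟨h2.symm, h'⟩⟩)) (not_lt.mpr h)

-- B's min-fold returns an element of the list whose key is minimal
theorem pvMinFold_spec (al : String) (t : List String) : ∀ c : String,
    (t.foldl (fun m x => if pvKeyLt (pvSelKey al x) (pvSelKey al m) then x else m) c) ∈ c :: t ∧
    ∀ y ∈ c :: t,
      pvK (pvSelKey al (t.foldl (fun m x => if pvKeyLt (pvSelKey al x) (pvSelKey al m) then x else m) c)) ≤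
        pvK (pvSelKey al y) := by
  induction t with
  | nil => intro c; simp
  | cons x t' ih =>
    intro c
    rw [List.foldl_cons]
    obtain ⟨ihmem, ihmin⟩ := ih (if pvKeyLt (pvSelKey al x) (pvSelKey al c) then x else c)
    have hboth : pvK (pvSelKey al (if pvKeyLt (pvSelKey al x) (pvSelKey al c) then x else c)) ≤ pvK (pvSelKey al c) ∧
        pvK (pvSelKey al (if pvKeyLt (pvSelKey al x) (pvSelKey al c) then x else c)) ≤ pvK (pvSelKey al x) := by
      by_cases h : pvKeyLt (pvSelKey al x) (pvSelKey al c) = true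
      · rw [if_pos h]; exact ⟨le_of_lt ((pvKeyLt_iff _ _).mp h), le_refl _⟩
      · rw [if_neg h]; exact ⟨le_refl _, (pvKeyLt_false_iff _ _).mp (Bool.eq_false_iff.mpr h)⟩
    refine ⟨?_, ?_⟩
    · rcases List.mem_cons.mp ihmem with h | h
      · rw [h]; by_cases hx : pvKeyLt (pvSelKey al x) (pvSelKey al c) = true
        · simp [hx]
        · simp [Bool.eq_false_iff.mpr hx]
      · exact List.mem_cons_of_mem _ (List.mem_cons_of_mem _ h)
    · intro y hy
      simp only [List.mem_cons] at hy
      rcases hy with rfl | rfl | h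
      · exact le_trans (ihmin _ List.mem_cons_self) hboth.1
      · exact le_trans (ihmin _ List.mem_cons_self) hboth.2
      · exact ihmin _ (List.mem_cons_of_mem _ h)

-- both ports build the same candidate list, namely pvCands
theorem pvStep_eq (s : PySem.Set String) (key : String) :
    (match parse_incorrect_path key with
     | none => s
     | some parsed =>
        if parsed.middle_parts ≠ [] then PySem.Set.add s (PySem.List.pyGetD parsed.middle_parts 0 "") else s)
    = (if 3 ≤ (pvSplitSlash key).length then PySem.Set.add s (PySem.List.pyGetD (pvSplitSlash key) 1 "") else s) := by
  by_cases h : (pvSplitSlash key).length < 3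
  · simp [parse_incorrect_path, h, if_neg (by omega : ¬ 3 ≤ (pvSplitSlash key).length)]
  · obtain ⟨a, b, c, rest, hp⟩ : ∃ a b c rest, pvSplitSlash key = a :: b :: c :: rest := by
      rcases hsp : pvSplitSlash key with _ | ⟨a, _ | ⟨b, _ | ⟨c, rest⟩⟩⟩
      · rw [hsp] at h; simp at h
      · rw [hsp] at h; simp at h
      · rw [hsp] at h; simp at h
      · exact ⟨a, b, c, rest, rfl⟩
    unfold parse_incorrect_path
    rw [hp]
    have hnlt : ¬ ((a :: b :: c :: rest).length < 3) := by simp only [List.length_cons]; omega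
    have hle3 : 3 ≤ (a :: b :: c :: rest).length := by omega
    simp only [if_neg hnlt, if_pos hle3]
    have hsl : PySem.List.slice (a :: b :: c :: rest) (some 1) (some (-1)) = (b :: c :: rest).dropLast := by
      simp [PySem.List.slice, List.dropLast_eq_take]
    have hne : (b :: c :: rest).dropLast ≠ [] := by simp
    simp only [hsl, if_pos hne]
    congr 1
    rw [List.dropLast_cons₂]
    rw [show (0:Int) = ((0:Nat):Int) from rfl, PySem.List.pyGetD_natCast]
    rw [show (1:Int) = ((1:Nat):Int) from rfl, PySem.List.pyGetD_natCast]
    simp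

theorem pvFoldB_eq (keys : List String) : ∀ s : PySem.Set String,
    keys.foldl (fun s key =>
      if 3 ≤ (pvSplitSlash key).length then PySem.Set.add s (PySem.List.pyGetD (pvSplitSlash key) 1 "") else s) s
    = ((keys.filter (fun k => 3 ≤ (pvSplitSlash k).length)).map
        (fun k => PySem.List.pyGetD (pvSplitSlash k) 1 "")).foldl PySem.Set.add s := by
  induction keys with
  | nil => intro s; rfl
  | cons k ks ih =>
    intro s
    by_cases h : 3 ≤ (pvSplitSlash k).length
    · simp only [List.foldl_cons, if_pos h, List.filter_cons, if_pos (decide_eq_true h)]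
      simp only [List.map_cons, List.foldl_cons]
      exact ih _
    · simp only [List.foldl_cons, if_neg h, List.filter_cons]
      simp only [decide_eq_false h, Bool.false_eq_true, if_false]
      exact ih _

theorem pvCands_eq_foldB (keys : List String) :
    keys.foldl (fun s key =>
      if 3 ≤ (pvSplitSlash key).length then PySem.Set.add s (PySem.List.pyGetD (pvSplitSlash key) 1 "") else s)
      PySem.Set.empty = pvCands keys := by
  rw [pvFoldB_eq]
  rw [pvCands, PySem.List.dedup_eq_ofList, PySem.Set.ofList_eq_foldl]
  rfl

theorem pvSelKey_eq (artist b : String) :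
    pvSelKey (PySem.Str.lower artist) b =
      (pvRank artist b,
       (if PySem.Str.isIn " - " b then PySem.Str.len b else 0),
       (if PySem.Str.isIn " - " b then "" else b)) := by
  unfold pvSelKey pvRank
  split_ifs <;> rfl

theorem pvFoldA_eq (keys : List String) :
    keys.foldl (fun s key =>
      match parse_incorrect_path key with
      | none => s
      | some parsed =>
          if parsed.middle_parts ≠ [] then PySem.Set.add s (PySem.List.pyGetD parsed.middle_parts 0 "") else s)
      PySem.Set.empty = pvCands keys := by
  rw [show (fun (s : PySem.Set String) key =>
      match parse_incorrect_path key with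
      | none => s
      | some parsed =>
          if parsed.middle_parts ≠ [] then PySem.Set.add s (PySem.List.pyGetD parsed.middle_parts 0 "") else s)
    = (fun (s : PySem.Set String) key =>
        if 3 ≤ (pvSplitSlash key).length then PySem.Set.add s (PySem.List.pyGetD (pvSplitSlash key) 1 "") else s)
    from funext fun s => funext fun key => pvStep_eq s key]
  exact pvCands_eq_foldB keys

-- the selection parts of the two ports, abstracted over the candidate list
def pvASel (artist : String) (C : List String) : Option String :=
  let preferred := C.filter (fun b => PySem.Str.isIn " - " b && PySem.Str.startswith (PySem.Str.lower b) (PySem.Str.lower artist))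
  if preferred ≠ [] then
    some (PySem.List.pyGetD (PySem.List.sorted preferred (fun b => PySem.Str.len b) false) 0 "")
  else
    let with_dash := C.filter (fun b => PySem.Str.isIn " - " b)
    if with_dash ≠ [] then
      some (PySem.List.pyGetD (PySem.List.sorted with_dash (fun b => PySem.Str.len b) false) 0 "")
    else if C ≠ [] then
      some (PySem.List.pyGetD (PySem.List.sorted C (fun b => b) false) 0 "")
    else none

def pvBSel (artist : String) (C : List String) : Option String :=
  match C with
  | [] => none
  | c :: t => some (t.foldl (fun m x =>
      if pvKeyLt (pvSelKey (PySem.Str.lower artist) x) (pvSelKey (PySem.Str.lower artist) m) then x else m) c)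

theorem pvA_eq (artist : String) (keys : List String) :
    determine_target_book artist keys = pvASel artist (pvCands keys) := by
  unfold determine_target_book pvASel
  rw [pvFoldA_eq]

theorem pvB_eq (artist : String) (keys : List String) :
    determine_target_book_alt artist keys = pvBSel artist (pvCands keys) := by
  unfold determine_target_book_alt pvBSel
  rw [pvCands_eq_foldB]
  rfl

theorem pvRank_cases (artist b : String) :
    pvRank artist b = 0 ∨ pvRank artist b = 1 ∨ pvRank artist b = 2 := by
  unfold pvRank; split_ifs <;> simp

theorem pvRank_eq_zero_iff (artist b : String) :
    pvRank artist b = 0 ↔ (PySem.Str.isIn " - " b && PySem.Str.startswith (PySem.Str.lower b) (PySem.Str.lower artist)) = true := by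
  unfold pvRank; split_ifs <;> simp_all

theorem pvRank_ne_two_iff (artist b : String) :
    pvRank artist b ≠ 2 ↔ PySem.Str.isIn " - " b = true := by
  unfold pvRank; split_ifs <;> simp_all

theorem pvRank_eq_two (artist b : String) (h : PySem.Str.isIn " - " b = false) :
    pvRank artist b = 2 := by
  unfold pvRank; rw [if_neg (by rw [h]; exact Bool.false_ne_true)]

theorem pvHead_pyGetD {h : String} {tl : List String} : PySem.List.pyGetD (h :: tl) 0 "" = h := by
  rw [show (0:Int) = ((0:Nat):Int) from rfl, PySem.List.pyGetD_natCast]; rfl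

theorem pvSel_eq (artist : String) (C : List String)
    (hpre : ∀ b ∈ C, ∀ c ∈ C, pvRank artist b = pvRank artist c → pvRank artist b ≠ 2 →
      PySem.Str.len b = PySem.Str.len c → b = c) :
    pvASel artist C = pvBSel artist C := by
  cases C with
  | nil => simp [pvASel, pvBSel]
  | cons c t =>
    obtain ⟨hrmem, hrmin⟩ := pvMinFold_spec (PySem.Str.lower artist) t c
    set r := t.foldl (fun m x =>
      if pvKeyLt (pvSelKey (PySem.Str.lower artist) x) (pvSelKey (PySem.Str.lower artist) m) then x else m) c with hrdef
    have hB : pvBSel artist (c :: t) = some r := rfl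
    have hK : ∀ b, pvSelKey (PySem.Str.lower artist) b =
        (pvRank artist b,
         (if PySem.Str.isIn " - " b then PySem.Str.len b else 0),
         (if PySem.Str.isIn " - " b then "" else b)) := fun b => pvSelKey_eq artist b
    rw [hB]
    unfold pvASel
    by_cases hp : (c :: t).filter (fun b => PySem.Str.isIn " - " b && PySem.Str.startswith (PySem.Str.lower b) (PySem.Str.lower artist)) ≠ []
    · rw [if_pos hp]
      rcases hs : PySem.List.sorted ((c :: t).filter (fun b => PySem.Str.isIn " - " b && PySem.Str.startswith (PySem.Str.lower b) (PySem.Str.lower artist))) (fun b => PySem.Str.len b) false with _ | ⟨h, tl⟩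
      · exact absurd ((PySem.List.sorted_eq_nil_iff _ _ _).mp hs) hp
      · rw [pvHead_pyGetD]
        have hhf : h ∈ (c :: t).filter (fun b => PySem.Str.isIn " - " b && PySem.Str.startswith (PySem.Str.lower b) (PySem.Str.lower artist)) := by
          rw [← PySem.List.mem_sorted _ (fun b => PySem.Str.len b) false, hs]; exact List.mem_cons_self
        obtain ⟨hhC, hq0h⟩ := List.mem_filter.mp hhf
        have hrankh : pvRank artist h = 0 := (pvRank_eq_zero_iff artist h).mpr hq0h
        have hle := hrmin h hhC
        have hrankr : pvRank artist r = 0 := by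
          have := pvK_le_fst _ _ hle
          rw [hK r, hK h] at this
          simp only [hrankh] at this
          rcases pvRank_cases artist r with h0 | h1 | h2 <;> omega
        have hq0r : (PySem.Str.isIn " - " r && PySem.Str.startswith (PySem.Str.lower r) (PySem.Str.lower artist)) = true :=
          (pvRank_eq_zero_iff artist r).mp hrankr
        have hdr : PySem.Str.isIn " - " r = true := by
          rw [Bool.and_eq_true] at hq0r; exact hq0r.1
        have hdh : PySem.Str.isIn " - " h = true := by
          rw [Bool.and_eq_true] at hq0h; exact hq0h.1
        have hrf : r ∈ (c :: t).filter (fun b => PySem.Str.isIn " - " b && PySem.Str.startswith (PySem.Str.lower b) (PySem.Str.lower artist)) :=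
          List.mem_filter.mpr ⟨hrmem, hq0r⟩
        have hlenhr : PySem.Str.len h ≤ PySem.Str.len r :=
          PySem.List.key_head_sorted_le _ _ hs r hrf
        have hlenrh : PySem.Str.len r ≤ PySem.Str.len h := by
          have h' := pvK_le_snd _ _ (by rw [hK r, hK h]; dsimp only; rw [hrankr, hrankh]) hle
          rw [hK r, hK h] at h'
          dsimp only at h'
          rwa [if_pos hdr, if_pos hdh] at h'
        have : h = r := hpre h hhC r hrmem (by rw [hrankh, hrankr])
          (by rw [hrankh]; omega) (le_antisymm hlenhr hlenrh)
        rw [this]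
    · rw [if_neg hp]
      push Not at hp
      have hq0none : ∀ b ∈ (c :: t), ¬ ((PySem.Str.isIn " - " b && PySem.Str.startswith (PySem.Str.lower b) (PySem.Str.lower artist)) = true) :=
        List.filter_eq_nil_iff.mp hp
      by_cases hw : (c :: t).filter (fun b => PySem.Str.isIn " - " b) ≠ []
      · rw [if_pos hw]
        rcases hs : PySem.List.sorted ((c :: t).filter (fun b => PySem.Str.isIn " - " b)) (fun b => PySem.Str.len b) false with _ | ⟨w, tl⟩
        · exact absurd ((PySem.List.sorted_eq_nil_iff _ _ _).mp hs) hw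
        · rw [pvHead_pyGetD]
          have hwf : w ∈ (c :: t).filter (fun b => PySem.Str.isIn " - " b) := by
            rw [← PySem.List.mem_sorted _ (fun b => PySem.Str.len b) false, hs]; exact List.mem_cons_self
          obtain ⟨hwC, hdw⟩ := List.mem_filter.mp hwf
          have hrankw : pvRank artist w = 1 := by
            have h0 := hq0none w hwC
            unfold pvRank
            rw [if_pos hdw, if_neg (by intro hsw; exact h0 (by rw [hdw, hsw]; rfl))]
          have hle := hrmin w hwC
          have hrankr : pvRank artist r = 1 := by
            have hfst := pvK_le_fst _ _ hle
            rw [hK r, hK w] at hfst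
            simp only [hrankw] at hfst
            have hr0 : pvRank artist r ≠ 0 := by
              intro h0
              exact hq0none r hrmem ((pvRank_eq_zero_iff artist r).mp h0)
            rcases pvRank_cases artist r with h0 | h1 | h2 <;> omega
          have hdr : PySem.Str.isIn " - " r = true :=
            (pvRank_ne_two_iff artist r).mp (by rw [hrankr]; omega)
          have hrf : r ∈ (c :: t).filter (fun b => PySem.Str.isIn " - " b) :=
            List.mem_filter.mpr ⟨hrmem, hdr⟩
          have hlenwr : PySem.Str.len w ≤ PySem.Str.len r :=
            PySem.List.key_head_sorted_le _ _ hs r hrf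
          have hlenrw : PySem.Str.len r ≤ PySem.Str.len w := by
            have h' := pvK_le_snd _ _ (by rw [hK r, hK w]; dsimp only; rw [hrankr, hrankw]) hle
            rw [hK r, hK w] at h'
            dsimp only at h'
            rwa [if_pos hdr, if_pos hdw] at h'
          have : w = r := hpre w hwC r hrmem (by rw [hrankw, hrankr])
            (by rw [hrankw]; omega) (le_antisymm hlenwr hlenrw)
          rw [this]
      · rw [if_neg hw, if_pos (by simp : (c :: t) ≠ [])]
        push Not at hw
        have hdnone : ∀ b ∈ (c :: t), ¬ (PySem.Str.isIn " - " b = true) :=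
          List.filter_eq_nil_iff.mp hw
        rcases hs : PySem.List.sorted (c :: t) (fun b => b) false with _ | ⟨g, tl⟩
        · exact absurd ((PySem.List.sorted_eq_nil_iff _ _ _).mp hs) (by simp)
        · rw [pvHead_pyGetD]
          have hgC : g ∈ (c :: t) := by
            rw [← PySem.List.mem_sorted _ (fun b => b) false, hs]; exact List.mem_cons_self
          have hgr : g ≤ r := PySem.List.key_head_sorted_le _ _ hs r hrmem
          have hdg : PySem.Str.isIn " - " g = false := Bool.eq_false_iff.mpr (hdnone g hgC)
          have hdr : PySem.Str.isIn " - " r = false := Bool.eq_false_iff.mpr (hdnone r hrmem)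
          have hle := hrmin g hgC
          have hrg : r ≤ g := by
            have h' := pvK_le_trd _ _
              (by rw [hK r, hK g]; dsimp only; rw [pvRank_eq_two artist r hdr, pvRank_eq_two artist g hdg])
              (by rw [hK r, hK g]; dsimp only;
                  rw [if_neg (by rw [hdr]; exact Bool.false_ne_true), if_neg (by rw [hdg]; exact Bool.false_ne_true)]) hle
            rw [hK r, hK g] at h'
            dsimp only at h'
            rwa [if_neg (by rw [hdr]; exact Bool.false_ne_true), if_neg (by rw [hdg]; exact Bool.false_ne_true)] at h'
          rw [le_antisymm hgr hrg]

-- ===== VERDICT (by name: the statement is the Claim_ definition above) =====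
theorem determine_target_book_spec : Claim_equal_determine_target_book := by
  intro artist keys _dom hpre
  unfold Spec_determine_target_book
  rw [pvA_eq, pvB_eq]
  exact pvSel_eq artist (pvCands keys) hpre
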